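-- pv_equiv track=rewrite | github.com/postvakje/oeis-sequences | oeis-sequences/OEISsequences.py | A215727
-- ===== SOURCE A (Python) =====
-- from itertools import (
--     islice,
--     count,
--     product,
--     permutations,
--     takewhile,
--     accumulate,
--     combinations_with_replacement,
--     combinations,
--     repeat,
--     groupby,
--     chain,
-- )
--
-- def A215727(n):
--     l, x = [str(d) * n for d in range(10)], 1
--     for m in count(0):
--         s = str(x)
--         for k in l:
--             if k in s:
--                 return m
--         x *= 3
-- ===== SOURCE B (Python) =====
-- def A215727(n):
--     if n <= 0:
--         return 0
--     m, x = 0, 1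
--     while True:
--         run, prev = 0, ''
--         for c in str(x):
--             run = run + 1 if c == prev else 1
--             prev = c
--             if run >= n:
--                 return m
--         m += 1
--         x *= 3
-- ===== Notes on version B (the rewrite author's own statement) =====
-- stated objective: alternative
-- what changed: The inner test 'does str(x) contain n equal consecutive digits' is re-implemented: instead of precomputing the ten n-character target strings str(d)*n and running ten substring searches per candidate power, B makes one left-to-right pass over str(x) maintaining the current run length and returns as soon as a run reaches n.
import Mathlib
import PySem

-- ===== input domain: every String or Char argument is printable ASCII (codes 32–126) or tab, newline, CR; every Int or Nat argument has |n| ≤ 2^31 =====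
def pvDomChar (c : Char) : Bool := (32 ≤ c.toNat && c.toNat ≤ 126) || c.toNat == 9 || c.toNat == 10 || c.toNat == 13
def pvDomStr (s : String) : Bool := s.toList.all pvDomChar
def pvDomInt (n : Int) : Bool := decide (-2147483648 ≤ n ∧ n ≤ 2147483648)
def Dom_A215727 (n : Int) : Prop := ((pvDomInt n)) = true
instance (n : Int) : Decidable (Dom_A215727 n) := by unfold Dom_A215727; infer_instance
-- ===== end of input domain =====

-- B replaces A's ten precomputed n-character target strings and their substring searches by a single
-- left-to-right run-length scan of str(x) with an early return (an alternative decomposition, not faster).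

-- ===== PORT A =====
-- fuel bound for the unbounded 'for m in count(0)' loop of both programs; 8000 > a(8) = 7720, so it
-- is never exhausted on any n on which CPython's A returns at all (for n ≥ 9 A raises ValueError:
-- str(x) exceeds CPython's 4300-digit int→str limit before an n-run of equal digits appears);
-- both ports share this bound and return 0 on exhaustion, and the equivalence below needs no
-- assumption on n
def pvFuel_A215727 : Nat := 8000

-- 'for m in count(0): s = str(x); for k in l: if k in s: return m; x *= 3'
def pvLoopA (l : List (List Char)) : Nat → Int → Int → Int
  | 0, _, _ => 0
  | fuel+1, x, m =>
      let s := PySem.Int.toChars x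
      if l.any (fun k => PySem.Chars.isIn k s) then m
      else pvLoopA l fuel (x * 3) (m + 1)

def A215727 (n : Int) : Int :=
  -- l = [str(d)*n for d in range(10)], x = 1
  let l : List (List Char) :=
    (PySem.List.pyRange 0 10 1).map (fun d => PySem.List.pyRepeat (PySem.Int.toChars d) n)
  pvLoopA l pvFuel_A215727 1 0

-- ===== PORT B =====
-- the inner scan of Source B: run/prev run-length counter over the characters of str(x),
-- early True once run >= n (Python's prev = '' start is the 'none' start: it matches no character)
def pvScanB (n : Int) : List Char → Int → Option Char → Bool
  | [], _, _ => false
  | c :: rest, run, prev =>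
      let run' := if prev = some c then run + 1 else 1
      if n ≤ run' then true else pvScanB n rest run' (some c)

-- 'while True: scan str(x); m += 1; x *= 3'
def pvLoopB (n : Int) : Nat → Int → Int → Int
  | 0, _, _ => 0
  | fuel+1, x, m =>
      if pvScanB n (PySem.Int.toChars x) 0 none then m
      else pvLoopB n fuel (x * 3) (m + 1)

def A215727_alt (n : Int) : Int :=
  if n ≤ 0 then 0 else pvLoopB n pvFuel_A215727 1 0

-- ===== PRECONDITION & SPEC =====
def Spec_A215727 (n : Int) (out : Int) : Prop := out = A215727_alt n
instance (n : Int) (out : Int) : Decidable (Spec_A215727 n out) := by unfold Spec_A215727; infer_instance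

-- ===== CLAIM (what is proved, stated in full; the proofs are below) =====
def Claim_equal_A215727 : Prop := ∀ (n : Int), Dom_A215727 n → Spec_A215727 n (A215727 n)

-- ===== LEMMAS AND PROOFS =====

-- current-run credit of the scanner state (length of the leading run of s that extends prev)
def pvCtl (prev : Option Char) (s : List Char) : Int :=
  match prev with
  | some p => ((s.takeWhile (· == p)).length : Int)
  | none => 0

-- the ten digit characters, in the order range(10) produces them
def pvDigits : List Char := ['0','1','2','3','4','5','6','7','8','9']

lemma pv_mem_digits {c : Char} (h : c.isDigit = true) : c ∈ pvDigits := by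
  have h1 : 48 ≤ c.toNat ∧ c.toNat ≤ 57 := by
    simp [Char.isDigit] at h
    exact Prod.mk_le_mk.mp h
  obtain ⟨hlo, hhi⟩ := h1
  have hc : ∀ (k : Nat), c.toNat = k → c = Char.ofNat k := by
    intro k hk; subst hk; exact (Char.ofNat_toNat c).symm
  interval_cases hk : c.toNat <;> simp [pvDigits, hc _ rfl]

lemma pv_toChars_digits {x : Int} (hx : 0 ≤ x) : ∀ c ∈ PySem.Int.toChars x, c.isDigit = true := by
  intro c hc
  unfold PySem.Int.toChars at hc
  rw [if_neg (by omega)] at hc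
  exact Nat.isDigit_of_mem_toDigits (by norm_num) (by norm_num) hc

theorem pv_repl_prefix (c : Char) : ∀ (s : List Char) (k : Nat),
    (List.replicate k c <+: s ↔ k ≤ (s.takeWhile (· == c)).length) := by
  intro s
  induction s with
  | nil => intro k; cases k <;> simp [List.replicate_succ]
  | cons a t ih =>
    intro k
    cases k with
    | zero => simp
    | succ k =>
      rw [List.replicate_succ]
      by_cases hac : a = c
      · subst hac
        simp only [List.takeWhile_cons, beq_self_eq_true]
        rw [List.cons_prefix_cons]
        simp [ih k]
      · have : (a == c) = false := by simp [hac]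
        simp [List.cons_prefix_cons, this, Ne.symm hac]

-- ∃-prefix characterisation at a cons
lemma pv_ex_prefix_cons {n : Int} (hn : 1 ≤ n) (a : Char) (t : List Char) :
    (∃ c, List.replicate n.toNat c <+: a :: t) ↔
      n.toNat ≤ 1 + (t.takeWhile (· == a)).length := by
  constructor
  · rintro ⟨c, hp⟩
    have hnn : 1 ≤ n.toNat := by omega
    obtain ⟨k, hk⟩ : ∃ k, n.toNat = k + 1 := ⟨n.toNat - 1, by omega⟩
    rw [hk, List.replicate_succ, List.cons_prefix_cons] at hp
    obtain ⟨rfl, hp⟩ := hp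
    rw [pv_repl_prefix] at hp
    omega
  · intro h
    refine ⟨a, ?_⟩
    obtain ⟨k, hk⟩ : ∃ k, n.toNat = k + 1 := ⟨n.toNat - 1, by omega⟩
    rw [hk, List.replicate_succ, List.cons_prefix_cons]
    exact ⟨rfl, (pv_repl_prefix a t k).2 (by omega)⟩

theorem pv_scan_iff {n : Int} (hn : 1 ≤ n) :
    ∀ (s : List Char) (run : Int) (prev : Option Char), 0 ≤ run → run < n →
      (pvScanB n s run prev = true ↔
        n ≤ run + pvCtl prev s ∨ ∃ c, List.replicate n.toNat c <:+: s) := by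
  intro s
  induction s with
  | nil =>
    intro run prev h0 hrn
    have hctl : pvCtl prev [] = 0 := by cases prev <;> simp [pvCtl]
    simp only [pvScanB]
    constructor
    · intro h; exact absurd h (by simp)
    · rintro (h | ⟨c, hc⟩)
      · omega
      · exfalso
        have := List.eq_nil_of_infix_nil hc
        have : n.toNat = 0 := by simpa [List.replicate_eq_nil_iff] using this
        omega
  | cons a t ih =>
    intro run prev h0 hrn
    have hcast : (n.toNat : Int) = n := by omega
    have hEx : (∃ c, List.replicate n.toNat c <:+: a :: t) ↔
        (n.toNat ≤ 1 + (t.takeWhile (· == a)).length ∨ ∃ c, List.replicate n.toNat c <:+: t) := by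
      constructor
      · rintro ⟨c, hc⟩
        rcases List.infix_cons_iff.1 hc with h | h
        · exact Or.inl ((pv_ex_prefix_cons hn a t).1 ⟨c, h⟩)
        · exact Or.inr ⟨c, h⟩
      · rintro (h | ⟨c, hc⟩)
        · obtain ⟨c, hc⟩ := (pv_ex_prefix_cons hn a t).2 h
          exact ⟨c, List.infix_cons_iff.2 (Or.inl hc)⟩
        · exact ⟨c, List.infix_cons_iff.2 (Or.inr hc)⟩
    by_cases hp : prev = some a
    · subst hp
      have hctl : pvCtl (some a) (a :: t) = 1 + ((t.takeWhile (· == a)).length : Int) := by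
        simp [pvCtl, add_comm]
      simp only [pvScanB, hctl, if_true]
      by_cases hle : n ≤ run + 1
      · simp only [if_pos hle, true_iff]
        left; omega
      · rw [if_neg hle]
        rw [ih (run + 1) (some a) (by omega) (by omega)]
        simp only [pvCtl, hEx]
        constructor
        · rintro (h | h)
          · left; omega
          · right; right; exact h
        · rintro (h | h | h)
          · left; omega
          · left; omega
          · right; exact h
    · have hctl : pvCtl prev (a :: t) = 0 := by
        cases prev with
        | none => simp [pvCtl]
        | some p =>
          have hpa : (a == p) = false := by
            simp only [beq_eq_false_iff_ne]; intro h; exact hp (by rw [h])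
          simp [pvCtl, hpa]
      simp only [pvScanB, if_neg hp, hctl]
      by_cases hle : n ≤ (1 : Int)
      · simp only [if_pos hle, true_iff]
        right
        rw [hEx]; left; omega
      · rw [if_neg hle]
        rw [ih 1 (some a) (by omega) (by omega)]
        simp only [pvCtl, hEx]
        constructor
        · rintro (h | h)
          · right; left; omega
          · right; right; exact h
        · rintro (h | h | h)
          · omega
          · left; omega
          · right; exact h

lemma pv_inner_eq {n : Int} (hn : 1 ≤ n) {x : Int} (hx : 0 ≤ x) :
    (((PySem.List.pyRange 0 10 1).map
        (fun d => PySem.List.pyRepeat (PySem.Int.toChars d) n)).any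
      (fun k => PySem.Chars.isIn k (PySem.Int.toChars x)))
    = pvScanB n (PySem.Int.toChars x) 0 none := by
  have hmap : ((PySem.List.pyRange 0 10 1).map
      (fun d => PySem.List.pyRepeat (PySem.Int.toChars d) n))
      = pvDigits.map (fun c => List.replicate n.toNat c) := by
    have h10 : PySem.List.pyRange 0 10 1 = [0,1,2,3,4,5,6,7,8,9] := by decide
    rw [h10]
    simp [pvDigits, PySem.List.pyRepeat_singleton, PySem.Int.toChars,
      (by decide : Nat.toDigits 10 0 = ['0']), (by decide : Nat.toDigits 10 1 = ['1']),
      (by decide : Nat.toDigits 10 2 = ['2']), (by decide : Nat.toDigits 10 3 = ['3']),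
      (by decide : Nat.toDigits 10 4 = ['4']), (by decide : Nat.toDigits 10 5 = ['5']),
      (by decide : Nat.toDigits 10 6 = ['6']), (by decide : Nat.toDigits 10 7 = ['7']),
      (by decide : Nat.toDigits 10 8 = ['8']), (by decide : Nat.toDigits 10 9 = ['9'])]
  rw [hmap, Bool.eq_iff_iff, List.any_eq_true]
  rw [pv_scan_iff hn (PySem.Int.toChars x) 0 none le_rfl (by omega)]
  simp only [List.mem_map, pvCtl]
  constructor
  · rintro ⟨k, ⟨c, hc, rfl⟩, hin⟩
    right
    exact ⟨c, (PySem.Chars.isIn_iff_infix _ _).1 hin⟩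
  · rintro (h | ⟨c, hc⟩)
    · omega
    · have hcd : c ∈ pvDigits := by
        apply pv_mem_digits
        apply pv_toChars_digits hx
        exact hc.subset (List.mem_replicate.2 ⟨by omega, rfl⟩)
      exact ⟨_, ⟨c, hcd, rfl⟩, (PySem.Chars.isIn_iff_infix _ _).2 hc⟩

lemma pv_loop_eq {n : Int} (hn : 1 ≤ n) :
    ∀ (fuel : Nat) (x m : Int), 0 ≤ x →
      pvLoopA ((PySem.List.pyRange 0 10 1).map
        (fun d => PySem.List.pyRepeat (PySem.Int.toChars d) n)) fuel x m
      = pvLoopB n fuel x m := by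
  intro fuel
  induction fuel with
  | zero => intro x m _; rfl
  | succ f ih =>
    intro x m hx
    simp only [pvLoopA, pvLoopB]
    rw [pv_inner_eq hn hx]
    by_cases h : pvScanB n (PySem.Int.toChars x) 0 none = true
    · simp [h]
    · simp only [Bool.not_eq_true] at h
      simp [h, ih (x * 3) (m + 1) (by nlinarith)]

lemma pv_nonpos (n : Int) (hn : n ≤ 0) : A215727 n = 0 := by
  unfold A215727
  have hf : pvFuel_A215727 = 7999 + 1 := rfl
  rw [hf]
  show (if ((PySem.List.pyRange 0 10 1).map
      (fun d => PySem.List.pyRepeat (PySem.Int.toChars d) n)).any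
      (fun k => PySem.Chars.isIn k (PySem.Int.toChars 1)) = true then (0 : Int)
    else pvLoopA _ 7999 (1 * 3) (0 + 1)) = 0
  rw [if_pos ?hany]
  case hany =>
    refine List.any_eq_true.2 ⟨PySem.List.pyRepeat (PySem.Int.toChars 0) n, ?_, ?_⟩
    · exact List.mem_map.2 ⟨0, by decide, rfl⟩
    · have h0 : PySem.List.pyRepeat (PySem.Int.toChars 0) n = [] := by
        have ht : PySem.Int.toChars 0 = ['0'] := by decide
        rw [ht, PySem.List.pyRepeat_singleton]
        simp [Int.toNat_of_nonpos hn]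
      rw [h0]
      exact PySem.Chars.isIn_nil _

-- ===== VERDICT (by name: the statement is the Claim_ definition above) =====
theorem A215727_spec : Claim_equal_A215727 := by
  intro n _
  unfold Spec_A215727 A215727_alt
  by_cases hn : n ≤ 0
  · rw [if_pos hn]; exact pv_nonpos n hn
  · simp only [if_neg hn]
    unfold A215727
    exact pv_loop_eq (by omega) pvFuel_A215727 1 0 (by norm_num)
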